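-- pv_equiv track=rewrite | github.com/jesusvilela/connection_laplacian_lean | findings/round6/stage5_negator_B/fuzz.py | enumerate_all_GW
-- ===== SOURCE A (Python) =====
-- import itertools
--
-- def edges_from_mask(n, mask):
--     potential = list(itertools.combinations(range(n), 2))
--     return [potential[i] for i in range(len(potential)) if (mask >> i) & 1]
--
-- def connected_components(n, edges):
--     adj = [[] for _ in range(n)]
--     for u, v in edges:
--         adj[u].append(v)
--         adj[v].append(u)
--     seen = [False] * n
--     comps = []
--     for s in range(n):
--         if seen[s]:
--             continue
--         stack = [s]
--         seen[s] = True
--         comp = []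
--         while stack:
--             u = stack.pop()
--             comp.append(u)
--             for w in adj[u]:
--                 if not seen[w]:
--                     seen[w] = True
--                     stack.append(w)
--         comps.append(set(comp))
--     return comps
--
-- def num_components(n, edges):
--     return len(connected_components(n, edges))
--
-- def enumerate_all_GW(n_max=5, connected_only=False):
--     """Exhaustive enumeration for n<=n_max: all graphs and all wrap subsets."""
--     out = []
--     for n in range(1, n_max + 1):
--         m_max = n * (n - 1) // 2
--         for mask in range(1 << m_max):
--             edges = edges_from_mask(n, mask)
--             if connected_only and n >= 1:
--                 if num_components(n, edges) != 1:
--                     continue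
--             m = len(edges)
--             for w_mask in range(1 << m):
--                 W = set(edges[i] for i in range(m) if (w_mask >> i) & 1)
--                 out.append((n, edges, W))
--     return out
-- ===== SOURCE B (Python) =====
-- def _powerset(xs):
--     """All sublists of xs in binary counting order (bit 0 <-> xs[0]), order-preserving."""
--     if not xs:
--         return [[]]
--     rest = _powerset(xs[1:])
--     out = []
--     for t in rest:
--         out.append(t)
--         out.append([xs[0]] + t)
--     return out
--
-- def _count_components(n, edges):
--     adj = [[] for _ in range(n)]
--     for u, v in edges:
--         adj[u].append(v)
--         adj[v].append(u)
--     seen = [False] * n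
--     count = 0
--     for s in range(n):
--         if seen[s]:
--             continue
--         count += 1
--         seen[s] = True
--         stack = [s]
--         while stack:
--             u = stack.pop()
--             for w in adj[u]:
--                 if not seen[w]:
--                     seen[w] = True
--                     stack.append(w)
--     return count
--
-- def enumerate_all_GW(n_max=5, connected_only=False):
--     """Exhaustive enumeration for n<=n_max: all graphs and all wrap subsets."""
--     out = []
--     for n in range(1, n_max + 1):
--         pairs = [(i, j) for i in range(n) for j in range(i + 1, n)]
--         for edges in _powerset(pairs):
--             if connected_only and _count_components(n, edges) != 1:
--                 continue
--             for W in _powerset(edges):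
--                 out.append((n, edges, set(W)))
--     return out
-- ===== Notes on version B (the rewrite author's own statement) =====
-- stated objective: alternative
-- what changed: Replaces the bitmask counting loops (enumerate every integer mask and re-index the combination list per bit, twice) by a structurally recursive powerset generator producing the edge subsets and wrap subsets directly in the same order, builds the candidate pairs with plain nested loops instead of itertools.combinations, and folds the component count into the DFS launch loop instead of materialising a list of component sets and taking its length.
import Mathlib
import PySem

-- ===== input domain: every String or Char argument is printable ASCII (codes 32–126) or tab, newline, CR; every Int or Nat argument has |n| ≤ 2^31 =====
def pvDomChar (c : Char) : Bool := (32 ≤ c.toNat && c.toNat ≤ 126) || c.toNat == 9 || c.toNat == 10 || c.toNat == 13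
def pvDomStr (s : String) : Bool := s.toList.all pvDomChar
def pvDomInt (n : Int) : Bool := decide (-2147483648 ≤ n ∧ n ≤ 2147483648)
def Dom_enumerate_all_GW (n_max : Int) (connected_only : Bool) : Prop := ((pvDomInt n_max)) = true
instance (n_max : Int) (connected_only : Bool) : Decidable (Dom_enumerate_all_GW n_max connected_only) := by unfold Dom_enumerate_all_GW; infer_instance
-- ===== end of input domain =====

-- B replaces the bitmask counting loops by a structurally recursive powerset generator (same order),
-- builds the candidate pairs with nested loops instead of itertools.combinations, and counts DFS
-- launches directly instead of collecting a list of component sets; objective: alternative.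

-- ===== PORT A =====

-- shared by both ports (the corresponding Python lines are identical in Source A and Source B):
-- 'for w in adj[u]: if not seen[w]: seen[w] = True; stack.append(w)'
-- (all indices reached here are in range, so pyGetD/pySetD are exact)
def pvVisit : List Int → List Bool → (List Bool × List Int)
  | [], seen => (seen, [])
  | w :: ws, seen =>
    if PySem.List.pyGetD seen w false then pvVisit ws seen
    else
      let r := pvVisit ws (PySem.List.pySetD seen w true)
      (r.1, w :: r.2)

-- shared: 'adj = [[] for _ in range(n)]; for u, v in edges: adj[u].append(v); adj[v].append(u)'
def pvAdj (n : Int) (edges : List (Int × Int)) : List (List Int) :=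
  edges.foldl (fun adj e =>
    let adj1 := PySem.List.pySetD adj e.1 (PySem.List.pyGetD adj e.1 [] ++ [e.2])
    PySem.List.pySetD adj1 e.2 (PySem.List.pyGetD adj1 e.2 [] ++ [e.1]))
    (List.replicate n.toNat [])

-- A's 'while stack:' DFS; the stack is kept top-first (Python appends/pops at the END; same values).
-- fuel n+1 bounds the iterations: each pop consumes one entry and every pushed vertex is freshly
-- marked seen, so at most n entries are ever pushed after the initial one.
def pvDfsA (adj : List (List Int)) : Nat → List Int → List Bool → List Int → (List Bool × List Int)
  | _, [], seen, comp => (seen, comp)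
  | 0, _, seen, comp => (seen, comp)
  | fuel + 1, u :: stack, seen, comp =>
    let r := pvVisit (PySem.List.pyGetD adj u []) seen
    pvDfsA adj fuel (r.2.reverse ++ stack) r.1 (comp ++ [u])

-- A's 'for s in range(n):' launch loop, collecting the component vertex lists
def pvCompsA (adj : List (List Int)) (fuel : Nat) : List Int → List Bool → List (List Int) → (List Bool × List (List Int))
  | [], seen, comps => (seen, comps)
  | s :: ss, seen, comps =>
    if PySem.List.pyGetD seen s false then pvCompsA adj fuel ss seen comps
    else
      let r := pvDfsA adj fuel [s] (PySem.List.pySetD seen s true) []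
      pvCompsA adj fuel ss r.1 (comps ++ [r.2])

def connected_components (n : Int) (edges : List (Int × Int)) : List (PySem.Set Int) :=
  ((pvCompsA (pvAdj n edges) (n.toNat + 1) (PySem.List.pyRange 0 n 1)
      (List.replicate n.toNat false) []).2).map PySem.Set.ofList

def num_components (n : Int) (edges : List (Int × Int)) : Int :=
  Int.ofNat (connected_components n edges).length

-- itertools.combinations(l, 2): all (l[i], l[j]) with i < j, in order (exact for r = 2)
def pvComb2 : List Int → List (Int × Int)
  | [] => []
  | x :: rest => rest.map (fun y => (x, y)) ++ pvComb2 rest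

-- '[xs[i] for i in range(len(xs)) if (mask >> i) & 1]'; mask ≥ 0 at every call site,
-- so '(mask >> i) & 1' is exactly 'mask // 2**i % 2' and 'i.toNat' is exact
def pvSelIdx (xs : List (Int × Int)) (mask : Int) : List (Int × Int) :=
  (PySem.List.pyRange 0 (xs.length : Int) 1).flatMap (fun i =>
    if PySem.Int.mod (PySem.Int.floordiv mask ((2 : Int) ^ i.toNat)) 2 == 1
    then (PySem.List.pyGet? xs i).toList else [])

def edges_from_mask (n mask : Int) : List (Int × Int) :=
  pvSelIdx (pvComb2 (PySem.List.pyRange 0 n 1)) mask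

-- '1 << m_max' = 2 ^ m_max.toNat (m_max ≥ 0 whenever the loop body runs)
def enumerate_all_GW (n_max : Int) (connected_only : Bool) : List (Int × (List (Int × Int)) × (List (Int × Int))) :=
  (PySem.List.pyRange 1 (n_max + 1) 1).foldl (fun out n =>
    let m_max := PySem.Int.floordiv (n * (n - 1)) 2
    (PySem.List.pyRange 0 ((2 : Int) ^ m_max.toNat) 1).foldl (fun out mask =>
      let edges := edges_from_mask n mask
      if connected_only && decide (1 ≤ n) && !(num_components n edges == 1) then out
      else
        (PySem.List.pyRange 0 ((2 : Int) ^ edges.length) 1).foldl (fun out w_mask =>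
          out ++ [(n, edges, PySem.Set.ofList (pvSelIdx edges w_mask))]) out)
      out) []

-- ===== PORT B =====

-- '[(i, j) for i in range(n) for j in range(i + 1, n)]'
def pvPairs (n : Int) : List (Int × Int) :=
  (PySem.List.pyRange 0 n 1).flatMap (fun i =>
    (PySem.List.pyRange (i + 1) n 1).map (fun j => (i, j)))

-- Source B's _powerset: structural recursion, subsets in binary counting order
def pvPw : List (Int × Int) → List (List (Int × Int))
  | [] => [[]]
  | x :: rest => (pvPw rest).flatMap (fun t => [t, x :: t])

-- Source B's 'while stack:' loop (identical lines to Source A's; same stack convention and fuel bound as pvDfsA)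
def pvDfsB (adj : List (List Int)) : Nat → List Int → List Bool → List Bool
  | _, [], seen => seen
  | 0, _, seen => seen
  | fuel + 1, u :: stack, seen =>
    let r := pvVisit (PySem.List.pyGetD adj u []) seen
    pvDfsB adj fuel (r.2.reverse ++ stack) r.1

-- Source B's launch loop with the running counter
def pvCountB (adj : List (List Int)) (fuel : Nat) : List Int → List Bool → Int → Int
  | [], _, cnt => cnt
  | s :: ss, seen, cnt =>
    if PySem.List.pyGetD seen s false then pvCountB adj fuel ss seen cnt
    else pvCountB adj fuel ss (pvDfsB adj fuel [s] (PySem.List.pySetD seen s true)) (cnt + 1)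

def pvCountComponents (n : Int) (edges : List (Int × Int)) : Int :=
  pvCountB (pvAdj n edges) (n.toNat + 1) (PySem.List.pyRange 0 n 1)
    (List.replicate n.toNat false) 0

def enumerate_all_GW_alt (n_max : Int) (connected_only : Bool) : List (Int × (List (Int × Int)) × (List (Int × Int))) :=
  (PySem.List.pyRange 1 (n_max + 1) 1).foldl (fun out n =>
    (pvPw (pvPairs n)).foldl (fun out edges =>
      if connected_only && !(pvCountComponents n edges == 1) then out
      else (pvPw edges).foldl (fun out W =>
        out ++ [(n, edges, PySem.Set.ofList W)]) out)
      out) []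

-- ===== PRECONDITION & SPEC =====
def Spec_enumerate_all_GW (n_max : Int) (connected_only : Bool) (out : List (Int × (List (Int × Int)) × (List (Int × Int)))) : Prop := out = enumerate_all_GW_alt n_max connected_only
instance (n_max : Int) (connected_only : Bool) (out : List (Int × (List (Int × Int)) × (List (Int × Int)))) : Decidable (Spec_enumerate_all_GW n_max connected_only out) := by unfold Spec_enumerate_all_GW; infer_instance

-- ===== CLAIM (what is proved, stated in full; the proofs are below) =====
def Claim_equal_enumerate_all_GW : Prop := ∀ (n_max : Int) (connected_only : Bool), Dom_enumerate_all_GW n_max connected_only → Spec_enumerate_all_GW n_max connected_only (enumerate_all_GW n_max connected_only)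

-- ===== LEMMAS AND PROOFS =====

-- ---- components: A's list of components has the length B counts ----

theorem pvDfsA_fst (adj : List (List Int)) : ∀ (fuel : Nat) (stack : List Int) (seen : List Bool) (comp : List Int),
    (pvDfsA adj fuel stack seen comp).1 = pvDfsB adj fuel stack seen := by
  intro fuel
  induction fuel with
  | zero => intro stack seen comp; cases stack <;> simp [pvDfsA, pvDfsB]
  | succ f ih => intro stack seen comp; cases stack <;> simp [pvDfsA, pvDfsB, ih]

theorem pvCompsA_snd_append (adj : List (List Int)) (fuel : Nat) : ∀ (ss : List Int) (seen : List Bool) (comps : List (List Int)),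
    (pvCompsA adj fuel ss seen comps).2 = comps ++ (pvCompsA adj fuel ss seen []).2 := by
  intro ss
  induction ss with
  | nil => intro seen comps; simp [pvCompsA]
  | cons s ss ih =>
    intro seen comps
    simp only [pvCompsA]
    by_cases h : PySem.List.pyGetD seen s false
    · rw [if_pos h, if_pos h]; exact ih _ _
    · rw [if_neg h, if_neg h]
      rw [ih _ (comps ++ _), ih _ ([] ++ _)]
      simp

theorem pvCountB_eq (adj : List (List Int)) (fuel : Nat) : ∀ (ss : List Int) (seen : List Bool) (cnt : Int),
    pvCountB adj fuel ss seen cnt = cnt + Int.ofNat (pvCompsA adj fuel ss seen []).2.length := by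
  intro ss
  induction ss with
  | nil => intro seen cnt; simp [pvCountB, pvCompsA]
  | cons s ss ih =>
    intro seen cnt
    simp only [pvCountB, pvCompsA]
    by_cases h : PySem.List.pyGetD seen s false
    · rw [if_pos h, if_pos h]; exact ih _ _
    · rw [if_neg h, if_neg h]
      rw [ih, ← pvDfsA_fst adj fuel [s] _ []]
      simp only [List.nil_append]
      have hsplit := pvCompsA_snd_append adj fuel ss
        ((pvDfsA adj fuel [s] (PySem.List.pySetD seen s true) []).1)
        [(pvDfsA adj fuel [s] (PySem.List.pySetD seen s true) []).2]
      rw [hsplit]; simp; omega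

theorem num_components_eq (n : Int) (edges : List (Int × Int)) :
    num_components n edges = pvCountComponents n edges := by
  unfold num_components connected_components pvCountComponents
  rw [pvCountB_eq]
  simp

-- ---- selection by mask bits = recursive powerset ----

-- proof-only Nat forms of the bit-selection comprehension
def pvSelN (xs : List (Int × Int)) (m : Nat) : List (Int × Int) :=
  (List.range xs.length).flatMap (fun k => if m / 2 ^ k % 2 = 1 then (xs[k]?).toList else [])

def pvSelR (m : Nat) : List (Int × Int) → List (Int × Int)
  | [] => []
  | x :: xs => (if m % 2 = 1 then [x] else []) ++ pvSelR (m / 2) xs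

theorem pvSelIdx_natCast (xs : List (Int × Int)) (m : Nat) :
    pvSelIdx xs (m : Int) = pvSelN xs m := by
  unfold pvSelIdx pvSelN
  rw [PySem.List.pyRange_zero_natCast, List.flatMap_map]
  congr 1
  funext k
  have h2 : ((2 : Int) ^ ((k : Int)).toNat) = ((2 ^ k : Nat) : Int) := by
    push_cast; simp
  rw [h2]
  have hc : (((m : Int)) / (2 : Int) ^ k % 2 = 1) ↔ (m / 2 ^ k % 2 = 1) := by
    constructor <;> intro hh <;> exact_mod_cast hh
  simp [hc]

theorem pvSelN_eq_selR : ∀ (xs : List (Int × Int)) (m : Nat), pvSelN xs m = pvSelR m xs := by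
  intro xs
  induction xs with
  | nil => intro m; simp [pvSelN, pvSelR]
  | cons x xs ih =>
    intro m
    unfold pvSelN pvSelR
    rw [List.length_cons, List.range_succ_eq_map, List.flatMap_cons, List.flatMap_map]
    congr 1
    · simp
    · rw [← ih (m / 2)]
      unfold pvSelN
      congr 1
      funext k
      have hdiv : m / 2 ^ (k + 1) = m / 2 / 2 ^ k := by
        rw [Nat.div_div_eq_div_mul, pow_succ, mul_comm]
      simp [hdiv]

theorem pv_range_two_mul : ∀ (K : Nat), List.range (2 * K) = (List.range K).flatMap (fun t => [2 * t, 2 * t + 1]) := by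
  intro K
  induction K with
  | zero => simp
  | succ k ih =>
    have h2 : 2 * (k + 1) = (2 * k + 1) + 1 := by omega
    rw [h2, List.range_succ, List.range_succ, List.range_succ, ih]
    simp

theorem map_selR_range : ∀ (xs : List (Int × Int)), (List.range (2 ^ xs.length)).map (fun m => pvSelR m xs) = pvPw xs := by
  intro xs
  induction xs with
  | nil => simp [pvSelR, pvPw]
  | cons x xs ih =>
    show (List.range (2 ^ (xs.length + 1))).map (fun m => pvSelR m (x :: xs)) = (pvPw xs).flatMap (fun t => [t, x :: t])
    rw [pow_succ, mul_comm, pv_range_two_mul, List.map_flatMap, ← ih, List.flatMap_map]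
    congr 1
    funext t
    have e1 : pvSelR (2 * t) (x :: xs) = pvSelR t xs := by
      have h0 : 2 * t % 2 = 0 := by omega
      have hd0 : 2 * t / 2 = t := by omega
      cases xs <;> simp [pvSelR, h0, hd0]
    have e2 : pvSelR (2 * t + 1) (x :: xs) = x :: pvSelR t xs := by
      have hm : (2 * t + 1) % 2 = 1 := by omega
      have hd : (2 * t + 1) / 2 = t := by omega
      cases xs <;> simp [pvSelR, hm, hd]
    simp [e1, e2]

theorem map_pvSelIdx_pyRange (xs : List (Int × Int)) :
    (PySem.List.pyRange 0 ((2 : Int) ^ xs.length) 1).map (fun mask => pvSelIdx xs mask) = pvPw xs := by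
  have h : ((2 : Int) ^ xs.length) = ((2 ^ xs.length : Nat) : Int) := by push_cast; simp
  rw [h, PySem.List.pyRange_zero_natCast, List.map_map, ← map_selR_range xs]
  congr 1
  funext k
  simp only [Function.comp]
  rw [pvSelIdx_natCast, pvSelN_eq_selR]

-- ---- combinations = nested-loop pairs ----

theorem comb2_pyRange_aux : ∀ (k : Nat) (a n : Int), (n - a).toNat = k →
    pvComb2 (PySem.List.pyRange a n 1) =
      (PySem.List.pyRange a n 1).flatMap (fun i => (PySem.List.pyRange (i + 1) n 1).map (fun j => (i, j))) := by
  intro k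
  induction k with
  | zero =>
    intro a n h
    have hna : n ≤ a := by omega
    rw [PySem.List.pyRange_one_eq_nil hna]
    simp [pvComb2]
  | succ k ih =>
    intro a n h
    have ha : a < n := by omega
    rw [PySem.List.pyRange_one_cons ha, List.flatMap_cons]
    simp only [pvComb2]
    rw [ih (a + 1) n (by omega)]

theorem pvPairs_eq_comb2 (n : Int) : pvPairs n = pvComb2 (PySem.List.pyRange 0 n 1) := by
  unfold pvPairs
  rw [comb2_pyRange_aux ((n - 0).toNat) 0 n rfl]

-- ---- lengths ----

theorem pvComb2_length : ∀ (l : List Int), (pvComb2 l).length = l.length * (l.length - 1) / 2 := by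
  intro l
  induction l with
  | nil => simp [pvComb2]
  | cons x r ih =>
    have key : ∀ L : Nat, L + L * (L - 1) / 2 = (L + 1) * ((L + 1) - 1) / 2 := by
      intro L
      rcases L with _ | m
      · simp
      · have he1 : Even ((m + 1) * m) := by
          simpa [mul_comm] using Nat.even_mul_succ_self m
        have he2 : Even ((m + 2) * (m + 1)) := by
          simpa [mul_comm] using Nat.even_mul_succ_self (m + 1)
        have h1 : (m + 1) * m / 2 * 2 = (m + 1) * m := Nat.div_mul_cancel he1.two_dvd
        have h2 : (m + 2) * (m + 1) / 2 * 2 = (m + 2) * (m + 1) := Nat.div_mul_cancel he2.two_dvd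
        have h3 : (m + 2) * (m + 1) = (m + 1) * m + 2 * (m + 1) := by ring
        simp only [Nat.succ_sub_one, show m + 1 + 1 = m + 2 from rfl]
        omega
    simp only [pvComb2, List.length_append, List.length_map, List.length_cons, ih]
    exact key r.length

theorem m_max_toNat (n : Int) (hn : 1 ≤ n) :
    (PySem.Int.floordiv (n * (n - 1)) 2).toNat = (pvComb2 (PySem.List.pyRange 0 n 1)).length := by
  rw [pvComb2_length, PySem.List.length_pyRange_one]
  rw [PySem.Int.floordiv_eq_ediv_of_pos (by norm_num : (0 : Int) < 2)]
  obtain ⟨k, rfl⟩ : ∃ k : Nat, n = (k : Int) := ⟨n.toNat, by omega⟩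
  have hk : 1 ≤ k := by exact_mod_cast hn
  have hsub : ((k : Int) - 1) = ((k - 1 : Nat) : Int) := by push_cast [hk]; ring
  simp only [sub_zero, Int.toNat_natCast]
  rw [hsub, ← Nat.cast_mul, show (2 : Int) = ((2 : Nat) : Int) from rfl, ← Int.natCast_div,
    Int.toNat_natCast]

-- ---- assembly ----

theorem pv_foldl_skip_append {α β : Type} (l : List α) (c : α → Bool) (g : α → List β) (acc : List β) :
    l.foldl (fun out x => if c x then out else out ++ g x) acc
      = acc ++ l.flatMap (fun x => if c x then [] else g x) := by
  have hfun : (fun (out : List β) (x : α) => if c x then out else out ++ g x)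
      = fun out x => out ++ if c x then [] else g x := by
    funext out x; by_cases h : c x <;> simp [h]
  rw [hfun, PySem.List.foldl_append_eq_flatMap]

theorem pv_flatMap_congr {α β : Type} {l : List α} {f g : α → List β}
    (h : ∀ x ∈ l, f x = g x) : l.flatMap f = l.flatMap g := by
  induction l with
  | nil => rfl
  | cons a l ih =>
    simp only [List.flatMap_cons]
    rw [h a (List.mem_cons_self ..), ih (fun x hx => h x (List.mem_cons_of_mem _ hx))]

theorem enumA_flat (n_max : Int) (co : Bool) :
    enumerate_all_GW n_max co
      = (PySem.List.pyRange 1 (n_max + 1) 1).flatMap (fun n =>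
          (PySem.List.pyRange 0 ((2 : Int) ^ (PySem.Int.floordiv (n * (n - 1)) 2).toNat) 1).flatMap (fun mask =>
            if co && decide (1 ≤ n) && !(num_components n (edges_from_mask n mask) == 1) then []
            else (PySem.List.pyRange 0 ((2 : Int) ^ (edges_from_mask n mask).length) 1).map
              (fun w_mask => (n, edges_from_mask n mask,
                PySem.Set.ofList (pvSelIdx (edges_from_mask n mask) w_mask))))) := by
  unfold enumerate_all_GW
  simp only [PySem.List.foldl_append_singleton_eq_map, pv_foldl_skip_append,
    PySem.List.foldl_append_eq_flatMap, List.nil_append]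

theorem enumB_flat (n_max : Int) (co : Bool) :
    enumerate_all_GW_alt n_max co
      = (PySem.List.pyRange 1 (n_max + 1) 1).flatMap (fun n =>
          (pvPw (pvPairs n)).flatMap (fun edges =>
            if co && !(pvCountComponents n edges == 1) then []
            else (pvPw edges).map (fun W => (n, edges, PySem.Set.ofList W)))) := by
  unfold enumerate_all_GW_alt
  simp only [PySem.List.foldl_append_singleton_eq_map, pv_foldl_skip_append,
    PySem.List.foldl_append_eq_flatMap, List.nil_append]

theorem enumerate_all_GW_spec_aux : ∀ (n_max : Int) (connected_only : Bool),
    enumerate_all_GW n_max connected_only = enumerate_all_GW_alt n_max connected_only := by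
  intro n_max co
  rw [enumA_flat, enumB_flat]
  apply pv_flatMap_congr
  intro n hn
  have h1n : 1 ≤ n := ((PySem.List.mem_pyRange_one.mp hn)).1
  rw [m_max_toNat n h1n]
  have hmask : ∀ (F : List (Int × Int) → List (Int × (List (Int × Int)) × (List (Int × Int)))),
      (PySem.List.pyRange 0 ((2 : Int) ^ (pvComb2 (PySem.List.pyRange 0 n 1)).length) 1).flatMap
        (fun mask => F (edges_from_mask n mask))
        = (pvPw (pvPairs n)).flatMap F := by
    intro F
    have hmap : (PySem.List.pyRange 0 ((2 : Int) ^ (pvComb2 (PySem.List.pyRange 0 n 1)).length) 1).map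
        (fun mask => edges_from_mask n mask) = pvPw (pvPairs n) := by
      unfold edges_from_mask
      rw [map_pvSelIdx_pyRange, pvPairs_eq_comb2]
    rw [← hmap, List.flatMap_map]
  refine Eq.trans (hmask (fun edges =>
    if co && decide (1 ≤ n) && !(num_components n edges == 1) then []
    else (PySem.List.pyRange 0 ((2 : Int) ^ edges.length) 1).map
      (fun w_mask => (n, edges, PySem.Set.ofList (pvSelIdx edges w_mask))))) ?_
  apply pv_flatMap_congr
  intro edges _
  have hco : (co && decide (1 ≤ n) && !(num_components n edges == 1))
      = (co && !(pvCountComponents n edges == 1)) := by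
    rw [num_components_eq]
    simp [h1n]
  rw [hco]
  by_cases hskip : (co && !(pvCountComponents n edges == 1)) = true
  · simp [hskip]
  · simp only [hskip, Bool.false_eq_true, if_false] at *
    rw [← map_pvSelIdx_pyRange edges, List.map_map]
    rfl

-- ===== VERDICT (by name: the statement is the Claim_ definition above) =====
theorem enumerate_all_GW_spec : Claim_equal_enumerate_all_GW := by
  intro n_max connected_only _
  unfold Spec_enumerate_all_GW
  exact enumerate_all_GW_spec_aux n_max connected_only
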